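-- pv_equiv track=rewrite | github.com/algogazaa/algogazaa | 구현/NC-1번/221017_조성윤.py | solution
-- ===== SOURCE A (Python) =====
-- from collections import deque
--
-- def solution(source):
--     source = deque(list(source))
--     dest = []
--     finalDest = ''
--     while source:
--         dest = []
--         for i in range(len(source)):
--             tempStr = source.popleft()
--             if tempStr not in dest:
--                 dest.append(tempStr)
--             else:
--                 source.append(tempStr)
--         dest.sort()
--         finalDest += ''.join(dest)
--
--     return finalDest
-- ===== SOURCE B (Python) =====
-- from collections import Counter
--
-- def solution(source):
--     cnt = Counter(source)
--     chars = sorted(cnt)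
--     m = max(cnt.values(), default=0)
--     out = []
--     for level in range(1, m + 1):
--         out.append(''.join(c for c in chars if cnt[c] >= level))
--     return ''.join(out)
-- ===== Notes on version B (the rewrite author's own statement) =====
-- stated objective: faster
-- what changed: A repeatedly sweeps a deque, per pass collecting first occurrences, sorting them and pushing duplicates back; B counts frequencies once, sorts the distinct characters once, and per level emits the sorted characters whose count is at least the level.
import Mathlib
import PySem

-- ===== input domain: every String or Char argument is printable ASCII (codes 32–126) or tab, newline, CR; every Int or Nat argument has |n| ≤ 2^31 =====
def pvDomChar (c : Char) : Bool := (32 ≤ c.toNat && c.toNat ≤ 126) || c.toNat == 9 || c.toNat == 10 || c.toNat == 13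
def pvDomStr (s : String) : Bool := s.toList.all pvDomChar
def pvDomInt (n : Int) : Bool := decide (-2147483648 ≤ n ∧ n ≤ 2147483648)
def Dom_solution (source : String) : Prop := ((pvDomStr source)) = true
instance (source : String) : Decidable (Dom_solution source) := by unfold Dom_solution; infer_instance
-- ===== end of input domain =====

-- B replaces A's repeated deque passes (one pass per level, quadratic) by a single frequency
-- count followed by one sorted emission per level: same output, computed per level from counts.

-- ===== PORT A =====
-- inner 'for i in range(len(source))' of A: n = the range counter, q = the deque, dest = dest.
-- The '[]' queue case is unreachable in A (the queue never empties mid-pass); Python would raise there.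
def pvRound : Nat → List Char → List Char → List Char × List Char
  | 0, q, dest => (dest, q)
  | _ + 1, [], dest => (dest, [])
  | n + 1, c :: q, dest =>
      if dest.contains c = false then pvRound n q (dest ++ [c])
      else pvRound n (q ++ [c]) dest

-- size bookkeeping cited by solLoopA's decreasing_by (the while loop terminates)
theorem pvRound_len : ∀ (n : Nat) (q d : List Char),
    ((pvRound n q d).1.length + (pvRound n q d).2.length) = d.length + q.length := by
  intro n
  induction n with
  | zero => intro q d; simp [pvRound]
  | succ n ih =>
    intro q d
    cases q with
    | nil => simp [pvRound]
    | cons c t =>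
      by_cases hc : c ∈ d
      · simp [pvRound, hc, ih]
      · simp [pvRound, hc, ih]; omega

theorem pvRound_dest_le : ∀ (n : Nat) (q d : List Char),
    d.length ≤ (pvRound n q d).1.length := by
  intro n
  induction n with
  | zero => intro q d; simp [pvRound]
  | succ n ih =>
    intro q d
    cases q with
    | nil => simp [pvRound]
    | cons c t =>
      by_cases hc : c ∈ d
      · simp [pvRound, hc, ih]
      · simp only [pvRound, List.contains_eq_mem, hc, decide_false]
        simp only [if_true]
        have := ih t (d ++ [c]); simp at this; omega

-- the 'while source:' loop of A (finalDest accumulation, as the list of characters)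
def solLoopA (q : List Char) : List Char :=
  if h : q = [] then []
  else
    let r := pvRound q.length q []
    PySem.List.sorted r.1 (fun x => x) ++ solLoopA r.2
termination_by q.length
decreasing_by
  have hlen := pvRound_len q.length q []
  obtain ⟨c, t, rfl⟩ := List.exists_cons_of_ne_nil h
  have hpos : 1 ≤ (pvRound (c :: t).length (c :: t) []).1.length := by
    simp only [List.length_cons, pvRound, List.contains_nil, if_true]
    have := pvRound_dest_le t.length t [c]
    simpa using this
  simp only [List.length_nil] at hlen
  omega

def solution (source : String) : String :=
  String.ofList (solLoopA source.toList)

-- ===== PORT B =====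
-- cnt = Counter(source); chars = sorted(cnt); m = max(cnt.values(), default=0);
-- per level append the sorted chars with cnt[c] >= level (cnt[c] ported as getD: c is a key).
def solution_alt (source : String) : String :=
  let cnt := PySem.Dict.counter source.toList
  let chars := PySem.List.sorted cnt.keys (fun x => x)
  let m := PySem.List.maxD cnt.values (fun v => v) 0
  String.ofList ((PySem.List.pyRange 1 (m + 1) 1).foldl
    (fun acc lvl => acc ++ chars.filter (fun c => decide (lvl ≤ cnt.getD c 0))) [])

-- ===== PRECONDITION & SPEC =====
def Spec_solution (source : String) (out : String) : Prop := out = solution_alt source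
instance (source : String) (out : String) : Decidable (Spec_solution source out) := by unfold Spec_solution; infer_instance

-- ===== CLAIM (what is proved, stated in full; the proofs are below) =====
def Claim_equal_solution : Prop := ∀ (source : String), Dom_solution source → Spec_solution source (solution source)

-- ===== LEMMAS AND PROOFS =====

-- the characters A pushes back during one pass: first occurrences (relative to seen) removed
def pvDups (seen : List Char) : List Char → List Char
  | [] => []
  | c :: t => if seen.contains c then c :: pvDups seen t else pvDups (seen ++ [c]) t

theorem pvRound_spec : ∀ (rest pushed seen : List Char),
    pvRound rest.length (rest ++ pushed) seen =
      (PySem.Set.update seen rest, pushed ++ pvDups seen rest) := by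
  intro rest
  induction rest with
  | nil => intro pushed seen; simp [pvRound, pvDups, PySem.Set.update]
  | cons c t ih =>
    intro pushed seen
    by_cases hc : c ∈ seen
    · have hc' : seen.contains c = true := by simpa using hc
      simp only [List.length_cons, List.cons_append, pvRound, hc', Bool.true_eq_false,
        if_false]
      have hgrp : t ++ pushed ++ [c] = t ++ (pushed ++ [c]) := by simp
      rw [hgrp, ih (pushed ++ [c]) seen]
      simp [pvDups, hc, PySem.Set.update, PySem.Set.add]
    · have hc' : seen.contains c = false := by simpa using hc
      simp only [List.length_cons, List.cons_append, pvRound, hc', if_true]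
      rw [ih pushed (seen ++ [c])]
      simp [pvDups, hc, PySem.Set.update, PySem.Set.add]

theorem pvRound_start (q : List Char) :
    pvRound q.length q [] = (PySem.Set.ofList q, pvDups [] q) := by
  have := pvRound_spec q [] []
  simpa [PySem.Set.update_nil_left] using this

theorem pvDups_count : ∀ (q seen : List Char) (c : Char),
    (pvDups seen q).count c = if c ∈ seen then q.count c else q.count c - 1 := by
  intro q
  induction q with
  | nil => intro seen c; simp [pvDups]
  | cons a t ih =>
    intro seen c
    by_cases ha : a ∈ seen
    · have ha' : seen.contains a = true := by simpa using ha
      simp only [pvDups, ha', if_true]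
      by_cases hca : c = a
      · subst hca; simp [ih, ha]
      · simp [ih, Ne.symm hca]
    · have ha' : seen.contains a = false := by simpa using ha
      simp only [pvDups, ha', Bool.false_eq_true, if_false]
      rw [ih (seen ++ [a]) c]
      by_cases hca : c = a
      · subst hca
        simp [ha]
      · simp [List.mem_append, hca, Ne.symm hca]

theorem pvDups_mem (q : List Char) (c : Char) : c ∈ pvDups [] q ↔ 2 ≤ q.count c := by
  rw [← List.count_pos_iff, pvDups_count]
  simp; omega

-- the distinct counts of q (= (counter q).values) and their max (= B's m)
def pvVals (q : List Char) : List Int :=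
  (PySem.Set.ofList q).map (fun k => ((q.count k : Nat) : Int))

def pvM (q : List Char) : Int := PySem.List.maxD (pvVals q) (fun v => v) 0

theorem pvVals_counter (q : List Char) : (PySem.Dict.counter q).values = pvVals q := by
  show (PySem.Dict.counter q).items.map (fun p => p.2) = pvVals q
  rw [PySem.Dict.items_counter]
  simp [pvVals, List.map_map]

theorem pvM_spec (q : List Char) (h : q ≠ []) :
    (∀ c ∈ q, (q.count c : Int) ≤ pvM q) ∧ ∃ c ∈ q, (q.count c : Int) = pvM q := by
  have hne : pvVals q ≠ [] := by
    have : q.head h ∈ PySem.Set.ofList q := by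
      rw [PySem.Set.mem_ofList]; exact List.head_mem h
    simp only [pvVals, ne_eq, List.map_eq_nil_iff]
    intro hzero; rw [hzero] at this; simp at this
  obtain ⟨m, hm⟩ : ∃ m, PySem.List.max? (pvVals q) (fun v => v) = some m := by
    cases hopt : PySem.List.max? (pvVals q) (fun v => v) with
    | none => exact absurd ((PySem.List.max?_eq_none_iff _ _).mp hopt) hne
    | some m => exact ⟨m, rfl⟩
  have hMeq : pvM q = m := by simp [pvM, PySem.List.maxD, hm]
  have hmem := PySem.List.max?_mem hm
  have hmax := PySem.List.max?_isMax hm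
  constructor
  · intro c hc
    have : ((q.count c : Nat) : Int) ∈ pvVals q := by
      simp only [pvVals, List.mem_map]
      exact ⟨c, by rw [PySem.Set.mem_ofList]; exact hc, rfl⟩
    rw [hMeq]; exact hmax _ this
  · simp only [pvVals, List.mem_map] at hmem
    obtain ⟨c, hc, hceq⟩ := hmem
    exact ⟨c, by rw [← PySem.Set.mem_ofList]; exact hc, by rw [hceq, hMeq]⟩

theorem pvM_pos (q : List Char) (h : q ≠ []) : 1 ≤ pvM q := by
  obtain ⟨-, c, hc, hceq⟩ := pvM_spec q h
  have : 0 < q.count c := List.count_pos_iff.mpr hc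
  omega

theorem pvM_dups (q : List Char) (h : q ≠ []) : pvM (pvDups [] q) = pvM q - 1 := by
  obtain ⟨hub, c0, hc0, hc0M⟩ := pvM_spec q h
  by_cases hq' : pvDups [] q = []
  · have hall : ∀ c ∈ q, q.count c ≤ 1 := by
      intro c _
      by_contra hgt
      have : c ∈ pvDups [] q := (pvDups_mem q c).mpr (by omega)
      rw [hq'] at this; simp at this
    have h1 : pvM q = 1 := by
      have := hall c0 hc0
      have hpos : 0 < q.count c0 := List.count_pos_iff.mpr hc0
      omega
    rw [hq', h1]; rfl
  · obtain ⟨hub', c1, hc1, hc1M⟩ := pvM_spec _ hq'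
    have hcnt1 : (pvDups [] q).count c1 = q.count c1 - 1 := by
      rw [pvDups_count]; simp
    have hc1q : 2 ≤ q.count c1 := (pvDups_mem q c1).mp hc1
    have hc1mem : c1 ∈ q := List.count_pos_iff.mp (by omega)
    have hM2 : 2 ≤ pvM q := by
      have := hub c1 hc1mem; omega
    have hc0' : c0 ∈ pvDups [] q := (pvDups_mem q c0).mpr (by omega)
    have hle : pvM (pvDups [] q) ≤ pvM q - 1 := by
      rw [← hc1M, hcnt1]
      have := hub c1 hc1mem
      omega
    have hge : pvM q - 1 ≤ pvM (pvDups [] q) := by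
      have := hub' c0 hc0'
      rw [pvDups_count] at this
      simp at this
      omega
    omega

-- shifting a unit-step range by one
theorem pvRange_shift (a b : Int) :
    PySem.List.pyRange (a + 1) (b + 1) 1 = (PySem.List.pyRange a b 1).map (· + 1) := by
  rw [PySem.List.pyRange_one, PySem.List.pyRange_one, List.map_map]
  have : b + 1 - (a + 1) = b - a := by ring
  rw [this]
  apply List.map_congr_left
  intro k _
  simp; ring

-- one level ℓ+1 of q is level ℓ of the pushed-back list (both are the strictly sorted
-- list of the characters whose count in q is at least ℓ+1)
theorem pvFilter_level (q : List Char) (lvl : Int) (h1 : 1 ≤ lvl) :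
    (PySem.List.sorted (PySem.Set.ofList q) (fun x => x)).filter
        (fun c => decide (lvl + 1 ≤ (q.count c : Int))) =
    (PySem.List.sorted (PySem.Set.ofList (pvDups [] q)) (fun x => x)).filter
        (fun c => decide (lvl ≤ ((pvDups [] q).count c : Int))) := by
  have s₁ : ((PySem.List.sorted (PySem.Set.ofList q) (fun x => x)).filter
      (fun c => decide (lvl + 1 ≤ (q.count c : Int)))).Pairwise (· < ·) :=
    (PySem.List.sorted_ofList_pairwise_lt q).filter _
  have s₂ : ((PySem.List.sorted (PySem.Set.ofList (pvDups [] q)) (fun x => x)).filter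
      (fun c => decide (lvl ≤ ((pvDups [] q).count c : Int)))).Pairwise (· < ·) :=
    (PySem.List.sorted_ofList_pairwise_lt (pvDups [] q)).filter _
  have nd₁ := s₁.imp (fun h => ne_of_lt h)
  have nd₂ := s₂.imp (fun h => ne_of_lt h)
  have hmem : ∀ c : Char,
      (c ∈ (PySem.List.sorted (PySem.Set.ofList q) (fun x => x)).filter
        (fun c => decide (lvl + 1 ≤ (q.count c : Int)))) ↔
      (c ∈ (PySem.List.sorted (PySem.Set.ofList (pvDups [] q)) (fun x => x)).filter
        (fun c => decide (lvl ≤ ((pvDups [] q).count c : Int)))) := by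
    intro c
    rw [List.mem_filter, List.mem_filter, PySem.List.mem_sorted, PySem.List.mem_sorted,
      PySem.Set.mem_ofList, PySem.Set.mem_ofList, pvDups_mem]
    have hc' : (pvDups [] q).count c = q.count c - 1 := by
      rw [pvDups_count]; simp
    have hcq : 0 < q.count c ↔ c ∈ q := List.count_pos_iff
    simp only [decide_eq_true_eq, hc', ← hcq]
    omega
  have hperm : ((PySem.List.sorted (PySem.Set.ofList q) (fun x => x)).filter
        (fun c => decide (lvl + 1 ≤ (q.count c : Int)))).Perm
      ((PySem.List.sorted (PySem.Set.ofList (pvDups [] q)) (fun x => x)).filter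
        (fun c => decide (lvl ≤ ((pvDups [] q).count c : Int)))) :=
    (List.perm_ext_iff_of_nodup nd₁ nd₂).mpr hmem
  have e₁ := PySem.List.sorted_eq_of_perm_of_pairwise_lt _ _ (fun x => x) hperm s₁
  have e₂ := PySem.List.sorted_eq_of_perm_of_pairwise_lt _ _ (fun x => x)
    (List.Perm.refl _) s₂
  exact e₁.symm.trans e₂

-- A's loop produces exactly B's level-by-level output
theorem solLoopA_eq : ∀ (n : Nat) (q : List Char), q.length ≤ n →
    solLoopA q = (PySem.List.pyRange 1 (pvM q + 1) 1).flatMap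
      (fun lvl => (PySem.List.sorted (PySem.Set.ofList q) (fun x => x)).filter
        (fun c => decide (lvl ≤ (q.count c : Int)))) := by
  intro n
  induction n with
  | zero =>
    intro q hq
    have : q = [] := List.eq_nil_of_length_eq_zero (by omega)
    subst this
    rw [solLoopA]
    simp [pvM, pvVals, PySem.List.maxD, PySem.List.max?, PySem.List.pyRange_one_eq_nil]
  | succ n ih =>
    intro q hq
    by_cases h : q = []
    · subst h
      rw [solLoopA]
      simp [pvM, pvVals, PySem.List.maxD, PySem.List.max?, PySem.List.pyRange_one_eq_nil]
    · rw [solLoopA]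
      simp only [h, dite_false, pvRound_start]
      have hM1 := pvM_pos q h
      -- the tail queue is shorter
      have hlen := pvRound_len q.length q []
      rw [pvRound_start] at hlen
      have hofpos : 1 ≤ (PySem.Set.ofList q).length := by
        have : q.head h ∈ PySem.Set.ofList q := by
          rw [PySem.Set.mem_ofList]; exact List.head_mem h
        exact List.length_pos_of_mem this
      simp only [List.length_nil, Nat.zero_add] at hlen
      have hih := ih (pvDups [] q) (by omega)
      -- peel level 1 off the range
      rw [PySem.List.pyRange_one_cons (by omega : (1:Int) < pvM q + 1)]
      rw [List.flatMap_cons]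
      -- level 1 keeps every distinct character
      have hlvl1 : (PySem.List.sorted (PySem.Set.ofList q) (fun x => x)).filter
          (fun c => decide ((1:Int) ≤ (q.count c : Int))) =
          PySem.List.sorted (PySem.Set.ofList q) (fun x => x) := by
        apply List.filter_eq_self.mpr
        intro c hc
        rw [PySem.List.mem_sorted, PySem.Set.mem_ofList] at hc
        have : 0 < q.count c := List.count_pos_iff.mpr hc
        simp; omega
      rw [hlvl1]
      congr 1
      -- remaining levels are the levels of the pushed-back list
      have hshift : PySem.List.pyRange (1 + 1) (pvM q + 1) 1 =
          (PySem.List.pyRange 1 (pvM q - 1 + 1) 1).map (· + 1) := by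
        have : pvM q + 1 = (pvM q - 1 + 1) + 1 := by ring
        rw [this, pvRange_shift]
      rw [hshift, List.flatMap_map, hih, pvM_dups q h]
      apply List.flatMap_congr
      intro lvl hlvl
      rw [PySem.List.mem_pyRange_one] at hlvl
      exact (pvFilter_level q lvl hlvl.1).symm

-- ===== VERDICT (by name: the statement is the Claim_ definition above) =====
theorem solution_spec : Claim_equal_solution := by
  unfold Claim_equal_solution
  intro source _
  unfold Spec_solution solution solution_alt
  dsimp only
  rw [PySem.List.foldl_append_eq_flatMap]
  simp only [List.nil_append, pvVals_counter, PySem.Dict.keys_counter,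
    PySem.Dict.getD_counter]
  rw [solLoopA_eq source.toList.length source.toList (le_refl _)]
  rfl
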